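-- pv_equiv track=rewrite | github.com/JoshOY/DataStructureCourseDesign | PROB10/my_sort/radixSort.py | __getMaxBit
-- ===== SOURCE A (Python) =====
-- def __getMaxBit(sorting_list):
--     d = 1
--     p = 10
--     for i in sorting_list:
--         while i > p:
--             d += 1
--             p *= 10
--     return d
-- ===== SOURCE B (Python) =====
-- def __getMaxBit(sorting_list):
--     if not sorting_list:
--         return 1
--     m = sorting_list[0]
--     for x in sorting_list[1:]:
--         if x > m:
--             m = x
--     d = 1
--     p = 10
--     while m > p:
--         d += 1
--         p *= 10
--     return d
-- ===== Notes on version B (the rewrite author's own statement) =====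
-- stated objective: simpler
-- what changed: Replaces A's interleaved per-element while-loop (digit counter re-checked against every element) with one max-reduction pass followed by a single digit-counting loop on the maximum.
import Mathlib
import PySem

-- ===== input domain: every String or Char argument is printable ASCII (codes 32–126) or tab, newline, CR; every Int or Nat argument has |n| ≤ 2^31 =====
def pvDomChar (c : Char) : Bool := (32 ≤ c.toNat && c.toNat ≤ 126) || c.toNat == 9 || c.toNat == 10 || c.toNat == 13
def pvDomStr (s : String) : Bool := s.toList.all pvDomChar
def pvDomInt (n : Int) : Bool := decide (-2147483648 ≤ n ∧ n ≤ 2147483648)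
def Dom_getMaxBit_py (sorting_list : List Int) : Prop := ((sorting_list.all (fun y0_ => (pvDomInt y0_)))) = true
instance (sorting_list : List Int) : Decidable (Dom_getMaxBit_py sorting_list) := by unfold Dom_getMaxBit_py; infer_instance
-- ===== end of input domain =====

-- B replaces A's interleaved per-element digit loop by one max pass then one digit loop (objective: simpler).


-- ===== PORT A =====
-- the inner 'while i > p: d += 1; p *= 10' loop; the '0 < p' conjunct is a
-- totality guard only (p is always a positive power of 10 in both programs)
def pvWhile (i d p : Int) : Int × Int :=
  if h : i > p ∧ 0 < p then pvWhile i (d + 1) (p * 10) else (d, p)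
termination_by (i - p).toNat
decreasing_by omega

-- 'for i in sorting_list' threading the (d, p) state through pvWhile
def pvForA : List Int → Int → Int → Int
  | [], d, _ => d
  | i :: rest, d, p =>
      let s := pvWhile i d p
      pvForA rest s.1 s.2

def getMaxBit_py (sorting_list : List Int) : Int := pvForA sorting_list 1 10

-- ===== PORT B =====
-- B's explicit max-reduction pass
def pvMaxLoop : List Int → Int → Int
  | [], m => m
  | x :: rest, m => pvMaxLoop rest (if x > m then x else m)

def getMaxBit_py_alt (sorting_list : List Int) : Int :=
  match sorting_list with
  | [] => 1
  | x :: rest =>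
      let m := pvMaxLoop rest x
      (pvWhile m 1 10).1

-- ===== PRECONDITION & SPEC =====
def Spec_getMaxBit_py (sorting_list : List Int) (out : Int) : Prop := out = getMaxBit_py_alt sorting_list
instance (sorting_list : List Int) (out : Int) : Decidable (Spec_getMaxBit_py sorting_list out) := by unfold Spec_getMaxBit_py; infer_instance

-- ===== CLAIM (what is proved, stated in full; the proofs are below) =====
def Claim_equal_getMaxBit_py : Prop := ∀ (sorting_list : List Int), Dom_getMaxBit_py sorting_list → Spec_getMaxBit_py sorting_list (getMaxBit_py sorting_list)

-- ===== LEMMAS AND PROOFS =====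

theorem pvWhile_nop (i d p : Int) (h : ¬ (i > p ∧ 0 < p)) : pvWhile i d p = (d, p) := by
  rw [pvWhile]; simp [h]

theorem pvWhile_step (i d p : Int) (h : i > p ∧ 0 < p) :
    pvWhile i d p = pvWhile i (d + 1) (p * 10) := by
  rw [pvWhile]; simp [h]

-- the final p dominates both the initial p and i
theorem pvWhile_snd_ge (i d p : Int) : p ≤ (pvWhile i d p).2 ∧ (0 < p → i ≤ (pvWhile i d p).2) := by
  fun_induction pvWhile i d p with
  | case1 d p h ih =>
      refine ⟨le_trans (by nlinarith [h.2]) ih.1, fun _ => ih.2 (by positivity)⟩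
  | case2 d p h => exact ⟨le_refl _, by omega⟩

-- processing a smaller-or-equal element after a larger one is a no-op at the level of results
theorem pvWhile_absorb (i j d p : Int) (hp : 0 < p) (hij : i ≤ j) :
    pvWhile i (pvWhile j d p).1 (pvWhile j d p).2 = pvWhile j d p := by
  have h2 := pvWhile_snd_ge j d p
  exact pvWhile_nop i _ _ (by have := h2.2 hp; omega)

-- processing a smaller element first does not change the outcome of processing a larger one
theorem pvWhile_skip (i j d p : Int) (hij : i ≤ j) :
    pvWhile j (pvWhile i d p).1 (pvWhile i d p).2 = pvWhile j d p := by
  fun_induction pvWhile i d p with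
  | case1 d p h ih =>
      rw [ih]
      exact (pvWhile_step j d p (by omega)).symm
  | case2 d p h => rfl

-- combine: sequential processing of i then j equals processing max i j
theorem pvWhile_merge (i j d p : Int) (hp : 0 < p) :
    pvWhile j (pvWhile i d p).1 (pvWhile i d p).2 = pvWhile (max i j) d p := by
  rcases le_total i j with h | h
  · rw [pvWhile_skip i j d p h, max_eq_right h]
  · rw [pvWhile_absorb j i d p hp h, max_eq_left h]

theorem pvMaxLoop_max (rest : List Int) (x y : Int) :
    pvMaxLoop rest (max x y) = max x (pvMaxLoop rest y) := by
  induction rest generalizing y with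
  | nil => simp [pvMaxLoop]
  | cons z zs ih =>
      simp only [pvMaxLoop]
      rw [show (if z > max x y then z else max x y) = max x (if z > y then z else y) by
            simp only [max_def]; split_ifs <;> omega,
          ih]

-- main invariant: the A-side fold over a nonempty list equals one pvWhile on the max
theorem pvForA_eq (rest : List Int) (x d p : Int) (hp : 0 < p) :
    pvForA (x :: rest) d p = (pvWhile (pvMaxLoop rest x) d p).1 := by
  induction rest generalizing x d p with
  | nil => simp [pvForA, pvMaxLoop]
  | cons y ys ih =>
      have hp' : 0 < (pvWhile x d p).2 := lt_of_lt_of_le hp (pvWhile_snd_ge x d p).1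
      calc pvForA (x :: y :: ys) d p
          = pvForA (y :: ys) (pvWhile x d p).1 (pvWhile x d p).2 := rfl
        _ = (pvWhile (pvMaxLoop ys y) (pvWhile x d p).1 (pvWhile x d p).2).1 := ih y _ _ hp'
        _ = (pvWhile (max x (pvMaxLoop ys y)) d p).1 := by rw [pvWhile_merge _ _ _ _ hp]
        _ = (pvWhile (pvMaxLoop ys (max x y)) d p).1 := by
              rw [pvMaxLoop_max]
        _ = (pvWhile (pvMaxLoop (y :: ys) x) d p).1 := by
              simp only [pvMaxLoop]
              rcases le_or_gt y x with h | h
              · rw [show max x y = x by omega, if_neg (by omega)]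
              · rw [show max x y = y by omega, if_pos (by omega)]

-- ===== VERDICT (by name: the statement is the Claim_ definition above) =====
theorem getMaxBit_py_spec : Claim_equal_getMaxBit_py := by
  intro l _
  unfold Spec_getMaxBit_py getMaxBit_py getMaxBit_py_alt
  cases l with
  | nil => simp [pvForA]
  | cons x rest => exact pvForA_eq rest x 1 10 (by norm_num)
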